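-- pv_equiv track=rewrite | github.com/VillalvaLijo/Udemy-Python-Course | Udemy_function_practice_7_12_19.py | old_macdonald
-- ===== SOURCE A (Python) =====
-- def old_macdonald(name):
--     namepf = ''
--     c = 0
--     for _ in name:
--         c += 1
--         if c==1 or c==4:
--             namepf += _.upper()
--         else:
--             namepf += _
--     return namepf
-- ===== SOURCE B (Python) =====
-- def old_macdonald(name):
--     chars = list(name)
--     for i in (0, 3):
--         if i < len(chars):
--             chars[i] = chars[i].upper()
--     return ''.join(chars)
-- ===== Notes on version B (the rewrite author's own statement) =====
-- stated objective: simpler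
-- what changed: Replaces the counter-driven scan over every character (string concatenation per step) with direct indexed mutation of a char list at only the two target positions 0 and 3, then a single join.
import Mathlib
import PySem

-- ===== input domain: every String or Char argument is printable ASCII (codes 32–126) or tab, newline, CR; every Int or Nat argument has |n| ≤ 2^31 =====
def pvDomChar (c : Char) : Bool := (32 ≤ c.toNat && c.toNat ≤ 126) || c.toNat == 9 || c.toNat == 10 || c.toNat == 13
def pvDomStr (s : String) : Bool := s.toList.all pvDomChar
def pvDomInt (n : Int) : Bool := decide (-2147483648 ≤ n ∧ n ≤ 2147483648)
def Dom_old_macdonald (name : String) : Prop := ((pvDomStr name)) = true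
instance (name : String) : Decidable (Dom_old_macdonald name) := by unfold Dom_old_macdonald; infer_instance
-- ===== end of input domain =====

-- B uppercases only positions 0 and 3 of a char list in place (bounds-guarded), instead of A's counter scan.

-- ===== PORT A =====
-- literal port of A: counter-driven fold over the characters, appending per step
def old_macdonald (name : String) : String :=
  let st := name.toList.foldl
    (fun (s : List Char × Int) ch =>
      let c := s.2 + 1
      if c == 1 || c == 4 then (s.1 ++ [PySem.Chars.upperChar ch], c)
      else (s.1 ++ [ch], c))
    ([], 0)
  String.mk st.1

-- ===== PORT B =====
-- literal port of B: indexed update at positions 0 and 3, then join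
def old_macdonald_alt (name : String) : String :=
  let chars := [0, 3].foldl
    (fun (cs : List Char) i =>
      if i < cs.length then cs.set i (PySem.Chars.upperChar cs[i]!) else cs)
    name.toList
  String.mk chars

-- ===== PRECONDITION & SPEC =====
def Spec_old_macdonald (name : String) (out : String) : Prop := out = old_macdonald_alt name
instance (name : String) (out : String) : Decidable (Spec_old_macdonald name out) := by unfold Spec_old_macdonald; infer_instance

-- ===== CLAIM (what is proved, stated in full; the proofs are below) =====
def Claim_equal_old_macdonald : Prop := ∀ (name : String), Dom_old_macdonald name → Spec_old_macdonald name (old_macdonald name)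

-- ===== LEMMAS AND PROOFS =====

-- once the counter has passed 4, A's loop appends every remaining character unchanged
theorem pv_tail_id (l : List Char) (acc : List Char) (c : Int) (hc : 4 ≤ c) :
    l.foldl
      (fun (s : List Char × Int) ch =>
        let c := s.2 + 1
        if c == 1 || c == 4 then (s.1 ++ [PySem.Chars.upperChar ch], c)
        else (s.1 ++ [ch], c))
      (acc, c) = (acc ++ l, c + l.length) := by
  induction l generalizing acc c with
  | nil => simp
  | cons x xs ih =>
    have h1 : (c + 1 == 1) = false := by simp; omega
    have h4 : (c + 1 == 4) = false := by simp; omega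
    simp only [List.foldl_cons, h1, h4, Bool.or_false, Bool.false_eq_true, if_false]
    rw [ih (acc ++ [x]) (c + 1) (by omega)]
    simp; omega

-- A's first four iterations, evaluated: positions 1 and 4 uppercased, counter at 4
theorem pv_first4 (a b c d : Char) (rest : List Char) :
    List.foldl
      (fun (s : List Char × Int) ch =>
        let c := s.2 + 1
        if c == 1 || c == 4 then (s.1 ++ [PySem.Chars.upperChar ch], c)
        else (s.1 ++ [ch], c))
      (([] : List Char), (0 : Int)) (a :: b :: c :: d :: rest)
    = List.foldl
      (fun (s : List Char × Int) ch =>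
        let c := s.2 + 1
        if c == 1 || c == 4 then (s.1 ++ [PySem.Chars.upperChar ch], c)
        else (s.1 ++ [ch], c))
      ([PySem.Chars.upperChar a, b, c, PySem.Chars.upperChar d], (4 : Int)) rest := by
  rfl

-- ===== VERDICT (by name: the statement is the Claim_ definition above) =====
theorem old_macdonald_spec : Claim_equal_old_macdonald := by
  intro name _
  show old_macdonald name = old_macdonald_alt name
  unfold old_macdonald old_macdonald_alt
  match h : name.toList with
  | [] => simp
  | [a] => simp [List.foldl]
  | [a, b] => simp [List.foldl]
  | [a, b, c] => simp [List.foldl]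
  | a :: b :: c :: d :: rest =>
    rw [pv_first4, pv_tail_id rest _ 4 (le_refl _)]
    simp [List.set]
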